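-- pv_equiv track=rewrite | github.com/samuelcolvin/dnserver | dnserver.py | zone_lines
-- ===== SOURCE A (Python) =====
-- def zone_lines(zone):
--     current_line = ''
--     for line in zone.splitlines():
--         if line.startswith('#'):
--             continue
--         line = line.rstrip('\r\n\t ')
--         if not line.startswith(' ') and current_line:
--             yield current_line
--             current_line = ''
--         current_line += line.lstrip('\r\n\t ')
--     if current_line:
--         yield current_line
-- ===== SOURCE B (Python) =====
-- def zone_lines(zone):
--     # Encode each record boundary as a sentinel '\n' separator while cleaning
--     # the lines, then cut the records out with a single split and drop empties.
--     parts = []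
--     for raw in zone.splitlines():
--         if raw.startswith('#'):
--             continue
--         line = raw.rstrip('\r\n\t ')
--         if not line.startswith(' '):
--             parts.append('\n')
--         parts.append(line.lstrip('\r\n\t '))
--     for record in ''.join(parts).split('\n'):
--         if record:
--             yield record
-- ===== Notes on version B (the rewrite author's own statement) =====
-- stated objective: alternative
-- what changed: B replaces A's stateful accumulator-and-yield loop by a sentinel encoding: while cleaning the lines it emits a newline separator before every non-continuation line, concatenates everything into one string, and recovers the records with a single split on newline plus a non-empty filter.
import Mathlib
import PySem

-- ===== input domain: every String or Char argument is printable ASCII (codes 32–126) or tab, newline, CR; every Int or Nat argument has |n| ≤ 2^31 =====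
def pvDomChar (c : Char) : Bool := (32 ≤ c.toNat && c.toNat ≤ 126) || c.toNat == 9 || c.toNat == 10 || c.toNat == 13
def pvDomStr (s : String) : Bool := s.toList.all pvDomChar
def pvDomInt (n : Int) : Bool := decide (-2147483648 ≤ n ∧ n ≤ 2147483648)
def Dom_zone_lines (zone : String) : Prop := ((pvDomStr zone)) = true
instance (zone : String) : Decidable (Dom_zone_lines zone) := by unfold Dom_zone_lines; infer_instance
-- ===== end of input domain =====

-- B encodes record boundaries as sentinel newline separators while cleaning the lines,
-- then obtains the records with one split plus a non-empty filter (objective: alternative).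

-- ===== PORT A =====
-- shared exact ports of str.lstrip('\r\n\t ') / str.rstrip('\r\n\t ') (drop the given chars from one side)
def pvStripSet : List Char := ['\r', '\n', '\t', ' ']

def pvLstripZ (cs : List Char) : List Char := cs.dropWhile (fun c => pvStripSet.contains c)

def pvRstripZ (cs : List Char) : List Char := (cs.reverse.dropWhile (fun c => pvStripSet.contains c)).reverse

-- A's single loop: state = current_line; yields are the produced list, in order
def zlA : List (List Char) → List Char → List (List Char)
  | [], cur => if cur.isEmpty then [] else [cur]
  | l :: rest, cur =>
    if PySem.Chars.startswith l ['#'] then zlA rest cur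
    else
      let l' := pvRstripZ l
      if !PySem.Chars.startswith l' [' '] && !cur.isEmpty then
        cur :: zlA rest (pvLstripZ l')
      else
        zlA rest (cur ++ pvLstripZ l')

def zone_lines (zone : String) : List String :=
  (zlA ((PySem.Str.splitlines zone).map String.toList) []).map String.ofList

-- ===== PORT B =====
-- B's loop: concatenate, per non-comment line, a newline sentinel (for non-continuation
-- lines) followed by the cleaned fragment ('parts' then joined by ''.join)
def zlB : List (List Char) → List Char
  | [] => []
  | l :: rest =>
    if PySem.Chars.startswith l ['#'] then zlB rest
    else
      let l' := pvRstripZ l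
      (if !PySem.Chars.startswith l' [' '] then ['\n'] else []) ++ pvLstripZ l' ++ zlB rest

-- Source B's str.split on the newline sentinel is ported as the corresponding Lean List.splitOn
def zone_lines_alt (zone : String) : List String :=
  (((zlB ((PySem.Str.splitlines zone).map String.toList)).splitOn '\n').filter
      (fun r => !r.isEmpty)).map String.ofList

-- ===== PRECONDITION & SPEC =====
def Spec_zone_lines (zone : String) (out : List String) : Prop := out = zone_lines_alt zone
instance (zone : String) (out : List String) : Decidable (Spec_zone_lines zone out) := by unfold Spec_zone_lines; infer_instance

-- ===== CLAIM (what is proved, stated in full; the proofs are below) =====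
def Claim_equal_zone_lines : Prop := ∀ (zone : String), Dom_zone_lines zone → Spec_zone_lines zone (zone_lines zone)

-- ===== LEMMAS AND PROOFS =====

-- B's second stage at the List Char level
def pvRecords (t : List Char) : List (List Char) :=
  (t.splitOn '\n').filter (fun r => !r.isEmpty)

theorem splitOn_no_newline (t : List Char) (h : '\n' ∉ t) : t.splitOn '\n' = [t] := by
  induction t with
  | nil => rfl
  | cons c cs ih =>
    have hc : (c == '\n') = false := by
      simp only [beq_eq_false_iff_ne]; intro hcn; exact h (hcn ▸ List.mem_cons_self)
    have ih' := ih (fun hm => h (List.mem_cons_of_mem _ hm))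
    simp only [List.splitOn] at ih' ⊢
    rw [List.splitOnP_cons]
    simp [hc, ih']

theorem records_no_newline (t : List Char) (h : '\n' ∉ t) :
    pvRecords t = if t.isEmpty then [] else [t] := by
  rw [pvRecords, splitOn_no_newline t h]
  cases t <;> simp

theorem splitOn_append_newline (cur t : List Char) (h : '\n' ∉ cur) :
    (cur ++ '\n' :: t).splitOn '\n' = cur :: t.splitOn '\n' := by
  induction cur with
  | nil => simp [List.splitOn, List.splitOnP_cons]
  | cons c cs ih =>
    have hc : (c == '\n') = false := by
      simp only [beq_eq_false_iff_ne]; intro hcn; exact h (hcn ▸ List.mem_cons_self)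
    have ih' := ih (fun hm => h (List.mem_cons_of_mem _ hm))
    simp only [List.splitOn, List.cons_append] at ih' ⊢
    rw [List.splitOnP_cons]
    simp [hc, ih']

theorem records_cut (cur t : List Char) (h : '\n' ∉ cur) :
    pvRecords (cur ++ '\n' :: t) =
      (if cur.isEmpty then [] else [cur]) ++ pvRecords t := by
  rw [pvRecords, splitOn_append_newline cur t h, pvRecords]
  cases cur <;> simp

-- main bridge: A's loop from state cur equals B's records of cur ++ the sentinel text
theorem zlA_eq_records (lines : List (List Char)) (cur : List Char)
    (hl : ∀ l ∈ lines, '\n' ∉ l) (hc : '\n' ∉ cur) :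
    zlA lines cur = pvRecords (cur ++ zlB lines) := by
  induction lines generalizing cur with
  | nil =>
    simp only [zlA, zlB, List.append_nil]
    rw [records_no_newline cur hc]
  | cons l rest ih =>
    have hlh : '\n' ∉ l := hl l List.mem_cons_self
    have hlr : ∀ x ∈ rest, '\n' ∉ x := fun x hx => hl x (List.mem_cons_of_mem _ hx)
    have hl' : '\n' ∉ pvRstripZ l := by
      intro hm; apply hlh
      have : '\n' ∈ l.reverse.dropWhile (fun c => pvStripSet.contains c) := by
        simpa [pvRstripZ] using hm
      exact List.mem_reverse.mp (List.dropWhile_subset _ this)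
    have hf : '\n' ∉ pvLstripZ (pvRstripZ l) := by
      intro hm; exact hl' (List.dropWhile_subset _ hm)
    by_cases hcm : PySem.Chars.startswith l ['#'] = true
    · simp only [zlA, zlB, hcm, if_true]; exact ih cur hlr hc
    · simp only [zlA, zlB, hcm, Bool.false_eq_true, if_false]
      by_cases hs : PySem.Chars.startswith (pvRstripZ l) [' '] = true
      · -- continuation line: no sentinel, fragment is appended to cur
        simp only [hs, Bool.not_true, Bool.false_and, Bool.false_eq_true, if_false,
          Bool.not_eq_true', Bool.not_true]
        rw [ih (cur ++ pvLstripZ (pvRstripZ l))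
            hlr (by simp only [List.mem_append]; rintro (h1 | h2); exacts [hc h1, hf h2])]
        simp
      · -- non-continuation line: sentinel '\n', record cut iff cur non-empty
        simp only [hs, Bool.false_eq_true, Bool.not_false, Bool.true_and, if_true]
        have hstep := ih (pvLstripZ (pvRstripZ l)) hlr hf
        by_cases hce : cur.isEmpty = true
        · have hnil : cur = [] := by cases cur <;> simp_all
          simp only [hnil, List.isEmpty_nil, Bool.not_true, Bool.false_eq_true, if_false,
            List.nil_append, List.singleton_append, List.append_assoc]
          have := records_cut [] (pvLstripZ (pvRstripZ l) ++ zlB rest) (by simp)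
          simp only [List.nil_append, List.isEmpty_nil, if_true] at this
          simp only [List.cons_append]
          rw [this]
          simpa using hstep
        · simp only [hce, Bool.not_false, if_true, List.singleton_append, List.append_assoc,
            List.cons_append]
          rw [records_cut cur _ hc]
          simp [hce, hstep]

-- splitlines.go only ever adds a char to the current line when isB rejects it
theorem splitlines_go_no_newline (isB : Char → Bool) (hnb : isB '\n' = true)
    (s cur : List Char) (acc : List (List Char)) (hcur : '\n' ∉ cur)
    (hacc : ∀ a ∈ acc, '\n' ∉ a) :
    ∀ l ∈ PySem.Chars.splitlines.go isB s cur acc, '\n' ∉ l := by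
  fun_induction PySem.Chars.splitlines.go isB s cur acc with
  | case1 cur acc h =>
    intro l hl; exact hacc _ (List.mem_reverse.mp hl)
  | case2 cur acc h =>
    intro l hl
    rcases List.mem_cons.mp (List.mem_reverse.mp hl) with h1 | h1
    · subst h1; simpa using hcur
    · exact hacc _ h1
  | case3 rest cur acc ih =>
    refine ih (by simp) ?_
    intro a ha
    rcases List.mem_cons.mp ha with h1 | h1
    · subst h1; simpa using hcur
    · exact hacc _ h1
  | case4 c rest cur acc hx hb ih =>
    refine ih (by simp) ?_
    intro a ha
    rcases List.mem_cons.mp ha with h1 | h1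
    · subst h1; simpa using hcur
    · exact hacc _ h1
  | case5 c rest cur acc hx hb ih =>
    refine ih ?_ hacc
    intro hm
    rcases List.mem_cons.mp hm with h1 | h1
    · subst h1; exact hb hnb
    · exact hcur h1

-- every line produced by splitlines contains no '\n'
theorem splitlines_no_newline (s : List Char) (l : List Char)
    (h : l ∈ PySem.Chars.splitlines s) : '\n' ∉ l := by
  unfold PySem.Chars.splitlines at h
  exact splitlines_go_no_newline _ (by decide) s [] [] (by simp) (by simp) l h

-- ===== VERDICT (by name: the statement is the Claim_ definition above) =====
theorem zone_lines_spec : Claim_equal_zone_lines := by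
  intro zone _
  unfold Spec_zone_lines zone_lines zone_lines_alt
  rw [zlA_eq_records _ []
      (by
        intro l hl
        simp only [List.mem_map] at hl
        obtain ⟨t, ht, rfl⟩ := hl
        have : t.toList ∈ PySem.Chars.splitlines zone.toList := by
          have hmap : (PySem.Str.splitlines zone).map String.toList
              = PySem.Chars.splitlines zone.toList := by simp [pysem]
          rw [← hmap]
          exact List.mem_map_of_mem ht
        exact splitlines_no_newline _ _ this)
      (by simp)]
  simp [pvRecords]
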